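-- pv_equiv track=rewrite | github.com/sofiascalzo/CyberChallenge-programming-pretest | Cyberchallenge Pretest/2023pretest3/2023pretest3.py | is_worker_enough
-- ===== SOURCE A (Python) =====
-- def is_worker_enough(tasks, T, num_workers):
--     TimeW = tasks[:num_workers]
--     i = num_workers
--
--     while i < len(tasks):
--         firstW = min(TimeW)
--         min_index = TimeW.index(firstW)
--
--         if TimeW[min_index] + tasks[i] <= T:
--             TimeW[min_index] += tasks[i]
--             i += 1
--         else:
--             return False
--
--     return True
-- ===== SOURCE B (Python) =====
-- # B: keep the worker loads in a sorted array: the least-loaded worker is loads[0];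
-- # after assigning a task, shift the remaining loads left until the updated load's
-- # ordered position is found (insertion-sort style), so no min()/.index() scans remain.
-- def is_worker_enough(tasks, T, num_workers):
--     loads = sorted(tasks[:num_workers])
--     for t in tasks[num_workers:]:
--         new = loads[0] + t
--         if new > T:
--             return False
--         k = 1
--         n = len(loads)
--         while k < n and loads[k] < new:
--             loads[k - 1] = loads[k]
--             k += 1
--         loads[k - 1] = new
--     return True
-- ===== Notes on version B (the rewrite author's own statement) =====
-- stated objective: alternative
-- what changed: A rescans the whole load list with min() and .index() (plus an extra indexed read) for every task; B keeps the loads as a sorted array, always takes worker loads[0] and restores order with one insertion-sort shift that stops at the new load's position, so the per-task scans disappear.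
-- outside the precondition, e.g. on is_worker_enough([1, 2, 3], 5, -1): A returns False, B returns True
import Mathlib
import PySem

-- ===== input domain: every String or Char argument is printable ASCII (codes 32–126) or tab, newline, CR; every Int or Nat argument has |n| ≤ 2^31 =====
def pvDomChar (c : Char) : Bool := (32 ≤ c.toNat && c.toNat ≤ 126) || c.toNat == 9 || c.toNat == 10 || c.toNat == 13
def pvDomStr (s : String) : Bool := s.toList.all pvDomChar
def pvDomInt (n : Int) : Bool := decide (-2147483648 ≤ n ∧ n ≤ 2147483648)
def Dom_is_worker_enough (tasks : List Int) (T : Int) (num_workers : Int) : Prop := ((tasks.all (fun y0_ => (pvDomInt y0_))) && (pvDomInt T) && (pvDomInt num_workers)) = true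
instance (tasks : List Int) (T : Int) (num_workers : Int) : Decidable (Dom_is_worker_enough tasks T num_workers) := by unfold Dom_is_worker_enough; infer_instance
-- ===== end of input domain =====

-- B keeps the worker loads sorted (loads[0] is the least-loaded worker) and restores order with
-- one insertion-sort shift per task, instead of A's per-task min()/.index() scans (objective: alternative).

-- ===== PORT A =====
-- the while loop: state (TimeW, i), fuel = number of remaining iterations (len(tasks) - i)
def pvGoA (tasks : List Int) (T : Int) : List Int → Int → Nat → Bool
  | _, _, 0 => true                           -- i ≥ len(tasks): loop exits, return True
  | TimeW, i, fuel + 1 =>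
    match PySem.List.min? TimeW (fun x => x) with    -- firstW = min(TimeW)
    | none => false                                  -- min([]) raises ValueError (outside Pre_)
    | some firstW =>
      match PySem.List.index? TimeW firstW with      -- min_index = TimeW.index(firstW)
      | none => false
      | some mi =>
        match PySem.List.pyGet? TimeW (mi : Int), PySem.List.pyGet? tasks i with
        | some v, some ti =>
          if v + ti ≤ T then                         -- if TimeW[min_index] + tasks[i] <= T
            pvGoA tasks T (TimeW.set mi (v + ti)) (i + 1) fuel
          else false
        | _, _ => false                              -- IndexError (outside Pre_)

def is_worker_enough (tasks : List Int) (T : Int) (num_workers : Int) : Bool :=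
  pvGoA tasks T (PySem.List.slice tasks none (some num_workers)) num_workers
    (tasks.length - num_workers.toNat)

-- ===== PORT B =====
-- the inner while loop of Source B: shift past smaller loads, place `new` at its ordered position
def pvIns (v : Int) : List Int → List Int
  | [] => [v]
  | x :: xs => if v ≤ x then v :: x :: xs else x :: pvIns v xs

-- the for loop of Source B over the remaining tasks, loads kept sorted
def pvGoB (T : Int) : List Int → List Int → Bool
  | _, [] => true
  | [], _ :: _ => false                 -- loads[0] raises IndexError (outside Pre_)
  | l0 :: ltl, t :: rest =>
    if T < l0 + t then false            -- if new > T: return False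
    else pvGoB T (pvIns (l0 + t) ltl) rest

def is_worker_enough_alt (tasks : List Int) (T : Int) (num_workers : Int) : Bool :=
  pvGoB T (PySem.List.sorted (PySem.List.slice tasks none (some num_workers)) (fun x => x) false)
    (PySem.List.slice tasks (some num_workers) none)

-- ===== PRECONDITION & SPEC =====
-- Pre_ restricts to the natural domain: a positive worker count (or no tasks at all); with a
-- non-positive num_workers and nonempty tasks A either raises ValueError (min of an empty list)
-- or re-reads tasks through Python's negative-index wraparound, which B does not reproduce.
def Pre_is_worker_enough (tasks : List Int) (T : Int) (num_workers : Int) : Prop :=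
  0 < num_workers ∨ (tasks = [] ∧ 0 ≤ num_workers)
instance (tasks : List Int) (T : Int) (num_workers : Int) : Decidable (Pre_is_worker_enough tasks T num_workers) := by unfold Pre_is_worker_enough; infer_instance

def pvWitness_is_worker_enough : List Int × Int × Int := ([1, 2, 3], 4, 2)

def Spec_is_worker_enough (tasks : List Int) (T : Int) (num_workers : Int) (out : Bool) : Prop := out = is_worker_enough_alt tasks T num_workers
instance (tasks : List Int) (T : Int) (num_workers : Int) (out : Bool) : Decidable (Spec_is_worker_enough tasks T num_workers out) := by unfold Spec_is_worker_enough; infer_instance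

-- ===== CLAIM (what is proved, stated in full; the proofs are below) =====
def Claim_equal_is_worker_enough : Prop := ∀ (tasks : List Int) (T : Int) (num_workers : Int), Dom_is_worker_enough tasks T num_workers → Pre_is_worker_enough tasks T num_workers → Spec_is_worker_enough tasks T num_workers (is_worker_enough tasks T num_workers)

-- ===== LEMMAS AND PROOFS =====

lemma pvIns_perm (v : Int) (l : List Int) : (pvIns v l).Perm (v :: l) := by
  induction l with
  | nil => simp [pvIns]
  | cons x xs ih =>
    simp only [pvIns]
    split
    · exact List.Perm.refl _
    · exact (List.Perm.cons x ih).trans (List.Perm.swap v x xs)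

lemma pvIns_pairwise (v : Int) (l : List Int) (h : l.Pairwise (· ≤ ·)) :
    (pvIns v l).Pairwise (· ≤ ·) := by
  induction l with
  | nil => simp [pvIns]
  | cons x xs ih =>
    rcases List.pairwise_cons.mp h with ⟨hx, hxs⟩
    simp only [pvIns]
    split
    · rename_i hvx
      refine List.pairwise_cons.mpr ⟨?_, h⟩
      intro y hy
      rcases List.mem_cons.mp hy with rfl | hy'
      · exact hvx
      · exact le_trans hvx (hx y hy')
    · rename_i hvx
      refine List.pairwise_cons.mpr ⟨?_, ih hxs⟩
      intro y hy
      have hy' := (pvIns_perm v xs).mem_iff.mp hy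
      rcases List.mem_cons.mp hy' with rfl | hy''
      · omega
      · exact hx y hy''

-- set at the first index of the minimum = replace one occurrence of the minimum (as a multiset)
lemma set_perm_cons_eraseIdx (xs : List Int) (n : Nat) (v : Int) (hn : n < xs.length) :
    (xs.set n v).Perm (v :: xs.eraseIdx n) := by
  rw [List.set_eq_take_append_cons_drop, if_pos hn, List.eraseIdx_eq_take_drop_succ]
  exact List.perm_middle

-- the loop invariant: B's sorted list is a rearrangement of A's load list
lemma pvGo_eq (tasks : List Int) (T : Int) :
    ∀ (fuel : Nat) (i : Int) (TimeW loads : List Int),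
      0 ≤ i → fuel = tasks.length - i.toNat →
      loads.Perm TimeW → loads.Pairwise (· ≤ ·) →
      pvGoA tasks T TimeW i fuel = pvGoB T loads (tasks.drop i.toNat) := by
  intro fuel
  induction fuel with
  | zero =>
    intro i TimeW loads hi hfuel _ _
    have : tasks.length ≤ i.toNat := by omega
    rw [List.drop_eq_nil_of_le this]
    rfl
  | succ fuel ih =>
    intro i TimeW loads hi hfuel hperm hsorted
    have hlt : i.toNat < tasks.length := by omega
    have hdrop : tasks.drop i.toNat = tasks[i.toNat] :: tasks.drop (i.toNat + 1) :=
      List.drop_eq_getElem_cons hlt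
    by_cases hTWe : TimeW = []
    · subst hTWe
      have hl : loads = [] := hperm.eq_nil
      subst hl
      rw [hdrop]
      simp [pvGoA, pvGoB, PySem.List.min?]
    · -- min(TimeW) exists
      obtain ⟨m, hm⟩ : ∃ m, PySem.List.min? TimeW (fun x => x) = some m := by
        cases hmin : PySem.List.min? TimeW (fun x => x) with
        | none => exact absurd ((PySem.List.min?_eq_none_iff TimeW _).mp hmin) hTWe
        | some m => exact ⟨m, rfl⟩
      have hmmem : m ∈ TimeW := PySem.List.min?_mem hm
      have hmmin : ∀ y ∈ TimeW, m ≤ y := fun y hy => PySem.List.min?_isMin hm y hy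
      obtain ⟨mi, hmi⟩ : ∃ mi, PySem.List.index? TimeW m = some mi := by
        cases hidx : PySem.List.index? TimeW m with
        | none => exact absurd hmmem ((PySem.List.index?_eq_none_iff TimeW m).mp hidx)
        | some mi => exact ⟨mi, rfl⟩
      obtain ⟨hmilt, hmi_get, _⟩ := PySem.List.getElem_of_index?_eq_some hmi
      have hget_m : PySem.List.pyGet? TimeW (mi : Int) = some m := by
        rw [PySem.List.pyGet?_natCast, List.getElem?_eq_getElem hmilt, hmi_get]
      have hget_t : PySem.List.pyGet? tasks i = some tasks[i.toNat] := by
        rw [PySem.List.pyGet?_of_nonneg tasks hi, List.getElem?_eq_getElem hlt]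
      -- loads is nonempty, its head is the minimum m
      cases hld : loads with
      | nil =>
        exact absurd ((hld ▸ hperm).symm.eq_nil) hTWe
      | cons l0 ltl =>
        have hl0mem : l0 ∈ TimeW := hperm.subset (hld ▸ List.mem_cons_self)
        have hml0 : m ≤ l0 := hmmin l0 hl0mem
        have hl0m : l0 ≤ m := by
          have hmload : m ∈ loads := hperm.mem_iff.mpr hmmem
          rw [hld] at hmload hsorted
          rcases List.mem_cons.mp hmload with rfl | hmtl
          · exact le_refl _
          · exact (List.pairwise_cons.mp hsorted).1 m hmtl
        have hl0 : l0 = m := le_antisymm hl0m hml0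
        subst hl0
        -- unfold one step of each loop
        rw [hdrop]
        simp only [pvGoA, pvGoB, hm, hmi, hget_m, hget_t]
        by_cases hcond : l0 + tasks[i.toNat] ≤ T
        · have hcond' : ¬ T < l0 + tasks[i.toNat] := by omega
          rw [if_pos hcond, if_neg hcond']
          -- recursive step: the updated lists are still a sorted rearrangement pair
          have h1 : (TimeW.set mi (l0 + tasks[i.toNat])).Perm
              ((l0 + tasks[i.toNat]) :: TimeW.eraseIdx mi) :=
            set_perm_cons_eraseIdx TimeW mi _ hmilt
          have hidxOf : List.idxOf l0 TimeW = mi := by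
            rw [List.idxOf_eq_getD_idxOf?, ← PySem.List.index?_eq_idxOf?, hmi]
            rfl
          have h2 : (TimeW.eraseIdx mi).Perm ltl := by
            rw [← List.erase_eq_eraseIdx_of_idxOf hidxOf]
            have := (hld ▸ hperm : (l0 :: ltl).Perm TimeW).symm.erase l0
            rw [List.erase_cons_head] at this
            exact this
          have hperm' : (pvIns (l0 + tasks[i.toNat]) ltl).Perm
              (TimeW.set mi (l0 + tasks[i.toNat])) :=
            ((pvIns_perm _ _).trans ((h2.symm).cons _)).trans h1.symm
          have hsorted' : (pvIns (l0 + tasks[i.toNat]) ltl).Pairwise (· ≤ ·) :=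
            pvIns_pairwise _ _ (List.pairwise_cons.mp (hld ▸ hsorted)).2
          have hnat : (i + 1).toNat = i.toNat + 1 := by omega
          have hrec := ih (i + 1) (TimeW.set mi (l0 + tasks[i.toNat]))
            (pvIns (l0 + tasks[i.toNat]) ltl) (by omega) (by omega) hperm' hsorted'
          rw [hnat] at hrec
          exact hrec
        · have hcond' : T < l0 + tasks[i.toNat] := by omega
          rw [if_neg hcond, if_pos hcond']

-- ===== VERDICT (by name: the statement is the Claim_ definition above) =====
theorem is_worker_enough_spec : Claim_equal_is_worker_enough := by
  intro tasks T num_workers _ hpre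
  unfold Spec_is_worker_enough is_worker_enough is_worker_enough_alt
  have hnn : 0 ≤ num_workers := by
    rcases hpre with h | ⟨_, h⟩ <;> omega
  rw [PySem.List.slice_from tasks hnn]
  exact (pvGo_eq tasks T _ num_workers _ _ hnn rfl
    (PySem.List.sorted_perm _ _ _)
    (PySem.List.sorted_pairwise (PySem.List.slice tasks none (some num_workers)) (fun x => x)))
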